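-- pv_equiv track=rewrite | github.com/fernando-vunge/random_algorithms | 4_largest_product.py | highest_produ
-- ===== SOURCE A (Python) =====
-- def highest_produ(matrix):
--     horizontal_product = 1
--     vertical_product = 1
--     highest_product = 1
--
--     for c in range(0,len(matrix[0])):
--         for row in matrix:
--             vertical_product *= row[c]
--             for columm in row:
--                 if(columm != 0):
--                     horizontal_product *= columm
--             if(horizontal_product >= highest_product):
--                 highest_product = horizontal_product
--             horizontal_product = 1
--         if(vertical_product >= highest_product):
--             highest_product = vertical_product
--         vertical_product = 1
--     return highest_product
-- ===== SOURCE B (Python) =====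
-- def highest_produ(matrix):
--     n = len(matrix[0])
--     best = 1
--     for row in matrix:
--         p = 1
--         for x in row:
--             if x != 0:
--                 p *= x
--         best = max(best, p)
--     for c in range(n):
--         p = 1
--         for row in matrix:
--             p *= row[c]
--         best = max(best, p)
--     return best
-- ===== Notes on version B (the rewrite author's own statement) =====
-- stated objective: faster
-- what changed: A recomputes every row product from scratch inside the column loop (rows*cols row scans); B computes each row product once in a single pass and each column product once, tracking a running max.
-- outside the precondition, e.g. on highest_produ([[], [5]]): A returns 1, B returns 5
import Mathlib
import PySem

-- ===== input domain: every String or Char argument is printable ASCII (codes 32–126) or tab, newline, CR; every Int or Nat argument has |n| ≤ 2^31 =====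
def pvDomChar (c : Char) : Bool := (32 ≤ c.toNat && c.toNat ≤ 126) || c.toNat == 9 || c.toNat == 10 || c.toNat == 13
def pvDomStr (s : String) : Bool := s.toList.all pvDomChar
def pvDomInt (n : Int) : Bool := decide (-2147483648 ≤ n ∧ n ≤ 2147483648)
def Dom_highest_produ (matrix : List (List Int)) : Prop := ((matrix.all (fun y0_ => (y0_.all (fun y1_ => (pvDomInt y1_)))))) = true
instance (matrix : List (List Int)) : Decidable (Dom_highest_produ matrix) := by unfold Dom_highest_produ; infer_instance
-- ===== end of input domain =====

-- B computes each row product once and each column product once with a running max,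
-- instead of A's recomputation of every row product inside the column loop (objective: faster).

-- ===== PORT A =====
-- one row step of A's inner loop: multiply the vertical product, rebuild the
-- horizontal (row) product skipping zeros, update the max, reset horizontal to 1
def pvStepRowA (c : Int) (st : Int × Int × Int) (row : List Int) : Int × Int × Int :=
  let v := st.2.1 * PySem.List.pyGetD row c 0
  let h := row.foldl (fun h x => if x ≠ 0 then h * x else h) st.1
  let best := if h ≥ st.2.2 then h else st.2.2
  (1, v, best)

-- one column step of A's outer loop: run all rows, then fold the vertical product
-- into the max and reset it to 1
def pvStepColA (matrix : List (List Int)) (st : Int × Int × Int) (c : Int) : Int × Int × Int :=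
  let st2 := matrix.foldl (pvStepRowA c) st
  let best := if st2.2.1 ≥ st2.2.2 then st2.2.1 else st2.2.2
  (st2.1, 1, best)

def highest_produ (matrix : List (List Int)) : Int :=
  let n := (PySem.List.pyGetD matrix 0 []).length
  ((PySem.List.pyRange 0 (n : Int) 1).foldl (pvStepColA matrix) (1, 1, 1)).2.2

-- ===== PORT B =====
-- product of a row, skipping zeros (as A's horizontal pass does)
def pvRowProd (row : List Int) : Int :=
  row.foldl (fun p x => if x ≠ 0 then p * x else p) 1

-- product of column c
def pvColProd (matrix : List (List Int)) (c : Int) : Int :=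
  matrix.foldl (fun p row => p * PySem.List.pyGetD row c 0) 1

def highest_produ_alt (matrix : List (List Int)) : Int :=
  let n := (PySem.List.pyGetD matrix 0 []).length
  let best := matrix.foldl (fun b row => max b (pvRowProd row)) 1
  (PySem.List.pyRange 0 (n : Int) 1).foldl (fun b c => max b (pvColProd matrix c)) best

-- ===== PRECONDITION & SPEC =====
-- Pre_ requires a nonempty input whose rows are at least as long as the first row
-- (shorter rows make A raise IndexError), and excludes the ragged corner where the
-- first row is empty but another row is not: such input is not a matrix, and there
-- A's value 1 (its column-driven loop never scans the data) and B's row-product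
-- maximum are both accidental readings of a degenerate input.
def Pre_highest_produ (matrix : List (List Int)) : Prop :=
  matrix ≠ [] ∧ ∀ row ∈ matrix,
    matrix.headI.length ≤ row.length ∧ (matrix.headI.length = 0 → row = [])
instance (matrix : List (List Int)) : Decidable (Pre_highest_produ matrix) := by
  unfold Pre_highest_produ; infer_instance

def pvWitness_highest_produ : List (List Int) := [[2, 3], [0, -1]]

def Spec_highest_produ (matrix : List (List Int)) (out : Int) : Prop := out = highest_produ_alt matrix
instance (matrix : List (List Int)) (out : Int) : Decidable (Spec_highest_produ matrix out) := by unfold Spec_highest_produ; infer_instance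

-- ===== CLAIM (what is proved, stated in full; the proofs are below) =====
def Claim_equal_highest_produ : Prop := ∀ (matrix : List (List Int)), Dom_highest_produ matrix → Pre_highest_produ matrix → Spec_highest_produ matrix (highest_produ matrix)

-- ===== LEMMAS AND PROOFS =====

-- max of previous best and the row products, B's first fold with a general start
def pvMaxRows (matrix : List (List Int)) (b : Int) : Int :=
  matrix.foldl (fun b row => max b (pvRowProd row)) b

theorem pvRowProd_shift (row : List Int) (h : Int) :
    row.foldl (fun h x => if x ≠ 0 then h * x else h) h = h * pvRowProd row := by
  induction row generalizing h with
  | nil => simp [pvRowProd]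
  | cons x xs ih =>
    simp only [pvRowProd, List.foldl_cons] at *
    rw [ih, ih (if x ≠ 0 then 1 * x else 1)]
    split <;> ring

theorem pvColProd_shift (ms : List (List Int)) (c v : Int) :
    ms.foldl (fun p row => p * PySem.List.pyGetD row c 0) v = v * pvColProd ms c := by
  induction ms generalizing v with
  | nil => simp [pvColProd]
  | cons r rs ih =>
    simp only [pvColProd, List.foldl_cons] at *
    rw [ih, ih (1 * PySem.List.pyGetD r c 0)]
    ring

theorem pvMaxRows_ge (ms : List (List Int)) (b : Int) : b ≤ pvMaxRows ms b := by
  induction ms generalizing b with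
  | nil => simp [pvMaxRows]
  | cons r rs ih =>
    simp only [pvMaxRows, List.foldl_cons] at *
    exact le_trans (le_max_left _ _) (ih _)

theorem pvMaxRows_shift (ms : List (List Int)) (b : Int) (hb : 1 ≤ b) :
    pvMaxRows ms b = max b (pvMaxRows ms 1) := by
  induction ms generalizing b with
  | nil => simp [pvMaxRows]; omega
  | cons r rs ih =>
    simp only [pvMaxRows, List.foldl_cons] at *
    rw [ih (max b (pvRowProd r)) (by omega), ih (max 1 (pvRowProd r)) (by omega)]
    omega

theorem pvInnerA (ms : List (List Int)) (c v best : Int) :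
    ms.foldl (pvStepRowA c) (1, v, best) = (1, v * pvColProd ms c, pvMaxRows ms best) := by
  induction ms generalizing v best with
  | nil => simp [pvColProd, pvMaxRows]
  | cons r rs ih =>
    simp only [List.foldl_cons]
    have hstep : pvStepRowA c (1, v, best) r
        = (1, v * PySem.List.pyGetD r c 0, max best (pvRowProd r)) := by
      simp only [pvStepRowA, pvRowProd]
      rw [pvRowProd_shift, one_mul]
      simp only [Prod.mk.injEq]
      refine ⟨by trivial, by trivial, by split <;> omega⟩
    rw [hstep, ih]
    simp only [pvColProd, pvMaxRows, List.foldl_cons]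
    rw [pvColProd_shift rs c (1 * PySem.List.pyGetD r c 0)]
    simp only [Prod.mk.injEq]
    refine ⟨by trivial, ?_, by trivial⟩
    rw [pvColProd_shift rs c 1]
    ring

theorem pvOuterA (cs : List Int) (ms : List (List Int)) (b : Int)
    (hb : 1 ≤ b) (hM : pvMaxRows ms 1 ≤ b) :
    (cs.foldl (pvStepColA ms) (1, 1, b)).2.2
      = cs.foldl (fun b c => max b (pvColProd ms c)) b := by
  induction cs generalizing b with
  | nil => rfl
  | cons c cs ih =>
    simp only [List.foldl_cons]
    have hstep : pvStepColA ms (1, 1, b) c = (1, 1, max b (pvColProd ms c)) := by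
      simp only [pvStepColA, pvInnerA, one_mul]
      have hMb : pvMaxRows ms b = b := by
        rw [pvMaxRows_shift ms b hb]; omega
      rw [hMb]
      simp only [Prod.mk.injEq]
      refine ⟨by trivial, by trivial, by split <;> omega⟩
    rw [hstep]
    exact ih (max b (pvColProd ms c)) (by omega) (by omega)

theorem pvMaxRows_nil_rows (ms : List (List Int)) (h : ∀ row ∈ ms, row = []) :
    pvMaxRows ms 1 = 1 := by
  induction ms with
  | nil => rfl
  | cons r rs ih =>
    have hr : r = [] := h r (by simp)
    simp only [pvMaxRows, List.foldl_cons, hr] at *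
    have : pvRowProd ([] : List Int) = 1 := rfl
    rw [this]
    simpa using ih (fun row hrow => h row (by simp [hrow]))

-- ===== VERDICT (by name: the statement is the Claim_ definition above) =====
theorem highest_produ_spec : Claim_equal_highest_produ := by
  intro matrix _ hpre
  obtain ⟨hne, hrows⟩ := hpre
  unfold Spec_highest_produ
  obtain ⟨r, rs, rfl⟩ := List.exists_cons_of_ne_nil hne
  have hget : PySem.List.pyGetD (r :: rs) 0 ([] : List Int) = r :=
    PySem.List.pyGetD_zero_cons _ _ _
  show highest_produ (r :: rs) = highest_produ_alt (r :: rs)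
  unfold highest_produ highest_produ_alt
  rw [hget]
  show ((PySem.List.pyRange 0 ((r.length : Int)) 1).foldl (pvStepColA (r :: rs)) (1, 1, 1)).2.2
      = (PySem.List.pyRange 0 ((r.length : Int)) 1).foldl
          (fun b c => max b (pvColProd (r :: rs) c)) (pvMaxRows (r :: rs) 1)
  by_cases hn : r.length = 0
  · -- no columns: Pre_ forces every row empty, both sides return 1
    have hall : ∀ row ∈ r :: rs, row = [] := by
      intro row hrow
      exact (hrows row hrow).2 (by simpa [List.headI] using hn)
    have hM : pvMaxRows (r :: rs) 1 = 1 := pvMaxRows_nil_rows _ hall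
    rw [hn, hM]
    simp
  · -- at least one column: peel the first column, then the running-max invariant
    have hlt : (0 : Int) < (r.length : Int) := by exact_mod_cast Nat.pos_of_ne_zero hn
    rw [PySem.List.pyRange_one_cons hlt]
    simp only [List.foldl_cons]
    have hstep : pvStepColA (r :: rs) (1, 1, 1) 0
        = (1, 1, max (pvMaxRows (r :: rs) 1) (pvColProd (r :: rs) 0)) := by
      simp only [pvStepColA, pvInnerA, one_mul]
      simp only [Prod.mk.injEq]
      refine ⟨by trivial, by trivial, by split <;> omega⟩
    rw [hstep]
    have h1 : (1 : Int) ≤ max (pvMaxRows (r :: rs) 1) (pvColProd (r :: rs) 0) :=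
      le_trans (pvMaxRows_ge _ 1) (le_max_left _ _)
    have h2 : pvMaxRows (r :: rs) 1 ≤ max (pvMaxRows (r :: rs) 1) (pvColProd (r :: rs) 0) :=
      le_max_left _ _
    exact pvOuterA _ _ _ h1 h2
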